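-- pv_equiv track=rewrite | github.com/tislander1/wordl_solver_01 | src/wordl1_first_word_statistics_finder.py | filter_by_letter_state
-- ===== SOURCE A (Python) =====
-- def filter_by_letter_state(word_list, input_string, letter_present):
--     #letter_present = True: Accept only words containing the letter
--     #letter_present = False: Accept only words not containing the letter
--     new_word_list = []
--     for word in word_list:
--         letter_state = False
--         for letter in input_string:
--             if (letter in word) ^ letter_present:
--                 letter_state = True
--                 break
--         if not letter_state:
--             new_word_list.append(word)
--     return new_word_list
-- ===== SOURCE B (Python) =====
-- def filter_by_letter_state(word_list, input_string, letter_present):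
--     # Staged passes: narrow the candidate list one letter at a time.
--     candidates = list(word_list)
--     for letter in input_string:
--         candidates = [w for w in candidates if (letter in w) == letter_present]
--     return candidates
-- ===== Notes on version B (the rewrite author's own statement) =====
-- stated objective: alternative
-- what changed: Swaps the loop nesting: instead of testing each word against all letters with a flag/XOR/break inner loop, B loops over the letters and progressively filters the shrinking candidate list (staged passes, letters outermost).
import Mathlib
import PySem

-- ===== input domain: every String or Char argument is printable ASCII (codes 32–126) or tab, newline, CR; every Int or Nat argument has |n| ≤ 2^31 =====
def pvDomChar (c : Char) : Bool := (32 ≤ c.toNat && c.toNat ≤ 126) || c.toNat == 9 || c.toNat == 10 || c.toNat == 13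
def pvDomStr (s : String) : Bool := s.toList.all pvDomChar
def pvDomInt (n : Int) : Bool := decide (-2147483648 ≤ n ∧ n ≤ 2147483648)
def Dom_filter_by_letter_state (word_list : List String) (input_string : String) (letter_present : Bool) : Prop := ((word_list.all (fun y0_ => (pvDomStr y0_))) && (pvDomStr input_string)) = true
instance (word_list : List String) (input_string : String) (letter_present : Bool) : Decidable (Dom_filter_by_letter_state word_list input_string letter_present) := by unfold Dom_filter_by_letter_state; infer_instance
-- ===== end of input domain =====

-- B swaps the loop nesting: it loops over the letters, progressively filtering the
-- candidate word list (staged passes), instead of A's per-word flag/XOR/break inner loop.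

-- ===== PORT A =====
-- A's inner loop: scans input_string; sets letter_state and breaks on the first letter
-- with (letter in word) ^ letter_present. Returns the final letter_state.
def pvLoopA (word : String) (chars : List Char) (letter_present : Bool) : Bool :=
  match chars with
  | [] => false
  | c :: rest =>
      if ((word.toList.contains c).xor letter_present) then true
      else pvLoopA word rest letter_present

def filter_by_letter_state (word_list : List String) (input_string : String) (letter_present : Bool) : List String :=
  word_list.foldl
    (fun new_word_list word =>
      if !(pvLoopA word input_string.toList letter_present) then new_word_list ++ [word]
      else new_word_list)
    []

-- ===== PORT B =====
-- B: fold over the letters, each step filtering the surviving candidate list.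
def filter_by_letter_state_alt (word_list : List String) (input_string : String) (letter_present : Bool) : List String :=
  input_string.toList.foldl
    (fun candidates letter =>
      candidates.filter (fun w => (w.toList.contains letter) == letter_present))
    word_list

-- ===== PRECONDITION & SPEC =====
def Spec_filter_by_letter_state (word_list : List String) (input_string : String) (letter_present : Bool) (out : List String) : Prop := out = filter_by_letter_state_alt word_list input_string letter_present
instance (word_list : List String) (input_string : String) (letter_present : Bool) (out : List String) : Decidable (Spec_filter_by_letter_state word_list input_string letter_present out) := by unfold Spec_filter_by_letter_state; infer_instance

-- ===== CLAIM (what is proved, stated in full; the proofs are below) =====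
def Claim_equal_filter_by_letter_state : Prop := ∀ (word_list : List String) (input_string : String) (letter_present : Bool), Dom_filter_by_letter_state word_list input_string letter_present → Spec_filter_by_letter_state word_list input_string letter_present (filter_by_letter_state word_list input_string letter_present)

-- ===== LEMMAS AND PROOFS =====

-- A's flag is false exactly when every scanned letter's membership equals letter_present.
theorem pvLoopA_eq_false_iff (word : String) (chars : List Char) (lp : Bool) :
    pvLoopA word chars lp = false ↔ ∀ c ∈ chars, word.toList.contains c = lp := by
  induction chars with
  | nil => simp [pvLoopA]
  | cons c rest ih =>
      cases hw : word.toList.contains c <;> cases lp <;>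
        simp_all [pvLoopA]

-- B's staged filtering collapses to one filter by the conjunction over all letters.
theorem foldl_filter_eq_filter_all (chars : List Char) (lp : Bool) (wl : List String) :
    chars.foldl
      (fun candidates letter =>
        candidates.filter (fun w => (w.toList.contains letter) == lp)) wl
      = wl.filter (fun w => chars.all (fun c => (w.toList.contains c) == lp)) := by
  induction chars generalizing wl with
  | nil => simp
  | cons c rest ih =>
      simp only [List.foldl_cons, ih, List.filter_filter, List.all_cons]
      apply List.filter_congr
      intro w _
      cases h : (w.toList.contains c == lp) <;> simp [Bool.and_comm]

-- ===== VERDICT (by name: the statement is the Claim_ definition above) =====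
theorem filter_by_letter_state_spec : Claim_equal_filter_by_letter_state := by
  intro word_list input_string letter_present _
  unfold Spec_filter_by_letter_state filter_by_letter_state filter_by_letter_state_alt
  rw [PySem.List.foldl_append_if_eq_filter, foldl_filter_eq_filter_all]
  simp only [List.nil_append]
  apply List.filter_congr
  intro w _
  cases hflag : pvLoopA w input_string.toList letter_present with
  | false =>
      have := (pvLoopA_eq_false_iff w input_string.toList letter_present).mp hflag
      simp only [Bool.not_false]
      exact (List.all_eq_true.mpr (fun c hc => by simpa using this c hc)).symm
  | true =>
      simp only [Bool.not_true]
      symm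
      rw [List.all_eq_false]
      by_contra h
      push Not at h
      have : pvLoopA w input_string.toList letter_present = false :=
        (pvLoopA_eq_false_iff w input_string.toList letter_present).mpr
          (fun c hc => by
            have := h c hc
            simpa using this)
      rw [this] at hflag; cases hflag
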